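-- pv_equiv track=rewrite | github.com/aaditg/VerityRAG | api/app/services/ask_service.py | _fact_keys_for_query
-- ===== SOURCE A (Python) =====
-- INTENT_HINTS: dict[str, list[str]] = {
--     'regions': ['cloud region', 'cloud regions', 'primarily use', 'primary region'],
--     'dr': ['rto', 'region', 'failover', 'disaster', 'recovery', 'backup', 'offline', 'redundancy'],
--     'dr_retention': ['long-term data retention', 'data retention', 'retention'],
--     'zero_trust': [
--         'zero-trust',
--         'zero trust',
--         'production access',
--         'layered controls',
--         'temporary access',
--         'public exposure',
--         'separate production workloads',
--     ],
--     'incident': ['incident', 'p1', 'eu', 'customer data', 'gdpr', 'postmortem', '72'],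
--     'request_path': ['path', 'frontend', 'database', 'request flow', 'full path'],
--     'observability': ['observability', 'latency', 'monitoring', 'tracing', 'metrics', 'logging', 'diagnosing'],
--     'secrets_auth': ['secrets', 'authentication', 'auth', 'mfa', 'rbac', 'okta', 'oauth'],
--     'cost_ops': ['cost', 'operational overhead', 'api cost'],
-- }
--
-- INTENT_FACT_KEYS: dict[str, list[str]] = {
--     'regions': ['cloud.primary_regions', 'cloud.multi_az', 'cloud.cross_region_replication'],
--     'dr': ['cloud.multi_az', 'cloud.cross_region_s3_backup', 'cloud.cross_region_replication', 'dr.rto', 'dr.frankfurt', 'dr.direct_connect'],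
--     'dr_retention': ['cloud.multi_az', 'cloud.cross_region_s3_backup', 'cloud.cross_region_replication', 'dr.automated_backup', 'dr.quarterly_failover', 'data.snowflake'],
--     'zero_trust': ['network.iap', 'network.private_subnets', 'network.vpn', 'auth.rbac', 'auth.mfa', 'auth.mdm', 'network.zero_trust', 'network.waf', 'network.load_balancer'],
--     'incident': ['incident.p1', 'incident.24_7', 'incident.postmortem', 'incident.72h', 'incident.gdpr'],
--     'request_path': ['network.cdn', 'network.waf', 'network.load_balancer', 'app.kubernetes', 'auth.oauth2', 'auth.okta', 'data.postgresql', 'data.redis'],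
--     'observability': ['observability.prometheus', 'observability.grafana', 'observability.elk', 'observability.opentelemetry', 'observability.pagerduty'],
--     'secrets_auth': ['auth.secrets_manager', 'auth.oauth2', 'auth.okta', 'auth.mfa', 'auth.rbac', 'auth.mdm', 'network.vpn'],
--     'cost_ops': ['data.redis', 'network.cdn', 'arch.hub_spoke_vpc', 'app.kubernetes', 'cloud.multi_az', 'observability.prometheus'],
-- }
--
-- def _detected_intents(query: str) -> list[str]:
--     q = query.lower()
--     found: list[str] = []
--     for k, hints in INTENT_HINTS.items():
--         if any(h in q for h in hints):
--             found.append(k)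
--     return found
--
-- def _primary_intent(query: str) -> str | None:
--     q = query.lower()
--     scored: list[tuple[int, str]] = []
--     for intent, hints in INTENT_HINTS.items():
--         hits = sum(1 for h in hints if h in q)
--         if hits > 0:
--             scored.append((hits, intent))
--     if not scored:
--         return None
--     scored.sort(key=lambda x: x[0], reverse=True)
--     return scored[0][1]
--
-- def _fact_keys_for_query(query: str) -> list[str]:
--     intents = _detected_intents(query)
--     keys: list[str] = []
--     primary = _primary_intent(query)
--     if primary and primary in intents:
--         intents = [primary] + [i for i in intents if i != primary]
--     for intent in intents:
--         keys.extend(INTENT_FACT_KEYS.get(intent, []))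
--     seen: set[str] = set()
--     out: list[str] = []
--     for k in keys:
--         if k in seen:
--             continue
--         seen.add(k)
--         out.append(k)
--     return out
-- ===== SOURCE B (Python) =====
-- # One merged table: intent -> (hints, fact keys), so the query is scanned once per intent.
-- _INTENT_DATA: list[tuple[str, list[str], list[str]]] = [
--     ('regions',
--      ['cloud region', 'cloud regions', 'primarily use', 'primary region'],
--      ['cloud.primary_regions', 'cloud.multi_az', 'cloud.cross_region_replication']),
--     ('dr',
--      ['rto', 'region', 'failover', 'disaster', 'recovery', 'backup', 'offline', 'redundancy'],
--      ['cloud.multi_az', 'cloud.cross_region_s3_backup', 'cloud.cross_region_replication', 'dr.rto', 'dr.frankfurt', 'dr.direct_connect']),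
--     ('dr_retention',
--      ['long-term data retention', 'data retention', 'retention'],
--      ['cloud.multi_az', 'cloud.cross_region_s3_backup', 'cloud.cross_region_replication', 'dr.automated_backup', 'dr.quarterly_failover', 'data.snowflake']),
--     ('zero_trust',
--      ['zero-trust', 'zero trust', 'production access', 'layered controls', 'temporary access', 'public exposure', 'separate production workloads'],
--      ['network.iap', 'network.private_subnets', 'network.vpn', 'auth.rbac', 'auth.mfa', 'auth.mdm', 'network.zero_trust', 'network.waf', 'network.load_balancer']),
--     ('incident',
--      ['incident', 'p1', 'eu', 'customer data', 'gdpr', 'postmortem', '72'],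
--      ['incident.p1', 'incident.24_7', 'incident.postmortem', 'incident.72h', 'incident.gdpr']),
--     ('request_path',
--      ['path', 'frontend', 'database', 'request flow', 'full path'],
--      ['network.cdn', 'network.waf', 'network.load_balancer', 'app.kubernetes', 'auth.oauth2', 'auth.okta', 'data.postgresql', 'data.redis']),
--     ('observability',
--      ['observability', 'latency', 'monitoring', 'tracing', 'metrics', 'logging', 'diagnosing'],
--      ['observability.prometheus', 'observability.grafana', 'observability.elk', 'observability.opentelemetry', 'observability.pagerduty']),
--     ('secrets_auth',
--      ['secrets', 'authentication', 'auth', 'mfa', 'rbac', 'okta', 'oauth'],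
--      ['auth.secrets_manager', 'auth.oauth2', 'auth.okta', 'auth.mfa', 'auth.rbac', 'auth.mdm', 'network.vpn']),
--     ('cost_ops',
--      ['cost', 'operational overhead', 'api cost'],
--      ['data.redis', 'network.cdn', 'arch.hub_spoke_vpc', 'app.kubernetes', 'cloud.multi_az', 'observability.prometheus']),
-- ]
--
--
-- def _fact_keys_for_query(query: str) -> list[str]:
--     q = query.lower()
--     matched = [(sum(h in q for h in hints), keys)
--                for _, hints, keys in _INTENT_DATA
--                if any(h in q for h in hints)]
--     if not matched:
--         return []
--     top = max(n for n, _ in matched)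
--     pi = next(i for i, (n, _) in enumerate(matched) if n == top)
--     return list(dict.fromkeys(
--         k
--         for _, keys in [matched[pi]] + matched[:pi] + matched[pi + 1:]
--         for k in keys))
-- ===== Notes on version B (the rewrite author's own statement) =====
-- stated objective: alternative
-- what changed: B merges the two hint/key dicts into one triple table scanned once by a comprehension (A scans the hint dict twice, once for found intents and once to re-score and stable-sort them), picks the primary via max + first matching index instead of the sort, reorders by slicing around that index instead of filtering by name, and dedups with dict.fromkeys instead of A's explicit seen-set loop.
import Mathlib
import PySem

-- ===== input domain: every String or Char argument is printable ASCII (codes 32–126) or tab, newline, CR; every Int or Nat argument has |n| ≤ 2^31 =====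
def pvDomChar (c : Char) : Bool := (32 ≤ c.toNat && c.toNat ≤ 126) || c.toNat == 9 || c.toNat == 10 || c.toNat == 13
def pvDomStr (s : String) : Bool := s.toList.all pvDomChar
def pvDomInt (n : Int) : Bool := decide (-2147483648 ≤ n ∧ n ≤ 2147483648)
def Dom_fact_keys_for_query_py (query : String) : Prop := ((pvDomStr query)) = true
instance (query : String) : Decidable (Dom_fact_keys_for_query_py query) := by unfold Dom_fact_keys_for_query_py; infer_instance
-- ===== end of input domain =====

-- B merges the two hint/key tables into one triple table scanned by a comprehension, picks the
-- primary via max + first-index instead of a re-scoring pass with a stable sort, reorders by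
-- slicing around that index, and dedups with dict.fromkeys; objective: alternative decomposition.

-- ===== PORT A =====
-- A's module constants: the two dicts INTENT_HINTS and INTENT_FACT_KEYS
def intentHints : List (String × List String) := [
  ("regions", ["cloud region", "cloud regions", "primarily use", "primary region"]),
  ("dr", ["rto", "region", "failover", "disaster", "recovery", "backup", "offline", "redundancy"]),
  ("dr_retention", ["long-term data retention", "data retention", "retention"]),
  ("zero_trust", ["zero-trust", "zero trust", "production access", "layered controls",
                  "temporary access", "public exposure", "separate production workloads"]),
  ("incident", ["incident", "p1", "eu", "customer data", "gdpr", "postmortem", "72"]),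
  ("request_path", ["path", "frontend", "database", "request flow", "full path"]),
  ("observability", ["observability", "latency", "monitoring", "tracing", "metrics", "logging", "diagnosing"]),
  ("secrets_auth", ["secrets", "authentication", "auth", "mfa", "rbac", "okta", "oauth"]),
  ("cost_ops", ["cost", "operational overhead", "api cost"])]

def intentFactKeys : PySem.Dict String (List String) := PySem.Dict.ofList [
  ("regions", ["cloud.primary_regions", "cloud.multi_az", "cloud.cross_region_replication"]),
  ("dr", ["cloud.multi_az", "cloud.cross_region_s3_backup", "cloud.cross_region_replication", "dr.rto", "dr.frankfurt", "dr.direct_connect"]),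
  ("dr_retention", ["cloud.multi_az", "cloud.cross_region_s3_backup", "cloud.cross_region_replication", "dr.automated_backup", "dr.quarterly_failover", "data.snowflake"]),
  ("zero_trust", ["network.iap", "network.private_subnets", "network.vpn", "auth.rbac", "auth.mfa", "auth.mdm", "network.zero_trust", "network.waf", "network.load_balancer"]),
  ("incident", ["incident.p1", "incident.24_7", "incident.postmortem", "incident.72h", "incident.gdpr"]),
  ("request_path", ["network.cdn", "network.waf", "network.load_balancer", "app.kubernetes", "auth.oauth2", "auth.okta", "data.postgresql", "data.redis"]),
  ("observability", ["observability.prometheus", "observability.grafana", "observability.elk", "observability.opentelemetry", "observability.pagerduty"]),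
  ("secrets_auth", ["auth.secrets_manager", "auth.oauth2", "auth.okta", "auth.mfa", "auth.rbac", "auth.mdm", "network.vpn"]),
  ("cost_ops", ["data.redis", "network.cdn", "arch.hub_spoke_vpc", "app.kubernetes", "cloud.multi_az", "observability.prometheus"])]

def detected_intents (query : String) : List String :=
  let q := PySem.Str.lower query
  intentHints.foldl (fun found kv =>
    if kv.2.any (fun h => PySem.Str.isIn h q) then found ++ [kv.1] else found) []

def primary_intent (query : String) : Option String :=
  let q := PySem.Str.lower query
  let scored : List (Int × String) := intentHints.foldl (fun sc kv =>
    let hits : Int := kv.2.foldl (fun n h => if PySem.Str.isIn h q then n + 1 else n) 0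
    if 0 < hits then sc ++ [(hits, kv.1)] else sc) []
  if scored.isEmpty then none
  else ((PySem.List.sorted scored (fun x => x.1) true).head?.map (fun x => x.2))

def fact_keys_for_query_py (query : String) : List String :=
  let intents := detected_intents query
  let primary := primary_intent query
  let intents := match primary with
    | some p => if intents.contains p then p :: intents.filter (fun i => i != p) else intents
    | none => intents
  let keys := intents.foldl (fun ks i => ks ++ (intentFactKeys.getD i [])) []
  (keys.foldl (fun (st : PySem.Set String × List String) k =>
      if PySem.Set.contains st.1 k then st
      else (PySem.Set.add st.1 k, st.2 ++ [k])) (PySem.Set.empty, [])).2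

-- ===== PORT B =====
-- B's module constant: the merged table _INTENT_DATA of (intent, hints, fact keys) triples
def intentData : List (String × List String × List String) := [
  ("regions",
   ["cloud region", "cloud regions", "primarily use", "primary region"],
   ["cloud.primary_regions", "cloud.multi_az", "cloud.cross_region_replication"]),
  ("dr",
   ["rto", "region", "failover", "disaster", "recovery", "backup", "offline", "redundancy"],
   ["cloud.multi_az", "cloud.cross_region_s3_backup", "cloud.cross_region_replication", "dr.rto", "dr.frankfurt", "dr.direct_connect"]),
  ("dr_retention",
   ["long-term data retention", "data retention", "retention"],
   ["cloud.multi_az", "cloud.cross_region_s3_backup", "cloud.cross_region_replication", "dr.automated_backup", "dr.quarterly_failover", "data.snowflake"]),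
  ("zero_trust",
   ["zero-trust", "zero trust", "production access", "layered controls", "temporary access", "public exposure", "separate production workloads"],
   ["network.iap", "network.private_subnets", "network.vpn", "auth.rbac", "auth.mfa", "auth.mdm", "network.zero_trust", "network.waf", "network.load_balancer"]),
  ("incident",
   ["incident", "p1", "eu", "customer data", "gdpr", "postmortem", "72"],
   ["incident.p1", "incident.24_7", "incident.postmortem", "incident.72h", "incident.gdpr"]),
  ("request_path",
   ["path", "frontend", "database", "request flow", "full path"],
   ["network.cdn", "network.waf", "network.load_balancer", "app.kubernetes", "auth.oauth2", "auth.okta", "data.postgresql", "data.redis"]),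
  ("observability",
   ["observability", "latency", "monitoring", "tracing", "metrics", "logging", "diagnosing"],
   ["observability.prometheus", "observability.grafana", "observability.elk", "observability.opentelemetry", "observability.pagerduty"]),
  ("secrets_auth",
   ["secrets", "authentication", "auth", "mfa", "rbac", "okta", "oauth"],
   ["auth.secrets_manager", "auth.oauth2", "auth.okta", "auth.mfa", "auth.rbac", "auth.mdm", "network.vpn"]),
  ("cost_ops",
   ["cost", "operational overhead", "api cost"],
   ["data.redis", "network.cdn", "arch.hub_spoke_vpc", "app.kubernetes", "cloud.multi_az", "observability.prometheus"])]

def fact_keys_for_query_py_alt (query : String) : List String :=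
  let q := PySem.Str.lower query
  -- matched = [(sum(h in q for h in hints), keys) for _, hints, keys in _INTENT_DATA if any(...)]
  let matched : List (Int × List String) :=
    (intentData.filter (fun t => t.2.1.any (fun h => PySem.Str.isIn h q))).map
      (fun t => (((t.2.1.countP (fun h => PySem.Str.isIn h q) : Nat) : Int), t.2.2))
  if matched.isEmpty then []
  else
    -- max(n for n, _ in matched); nonempty here, so Python's max returns
    let top : Int := (PySem.List.max? (matched.map (fun x => x.1)) (fun n => n)).getD 0
    -- next(i for i, (n, _) in enumerate(matched) if n == top)
    let pi : Nat := matched.findIdx (fun x => x.1 == top)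
    -- matched[pi] has a valid index; matched[:pi] / matched[pi+1:] with 0 ≤ bounds are take/drop (exact)
    PySem.List.dedup
      ((matched.getD pi (0, []) :: (matched.take pi ++ matched.drop (pi + 1))).flatMap
        (fun x => x.2))

-- ===== PRECONDITION & SPEC =====
def Spec_fact_keys_for_query_py (query : String) (out : List String) : Prop := out = fact_keys_for_query_py_alt query
instance (query : String) (out : List String) : Decidable (Spec_fact_keys_for_query_py query out) := by unfold Spec_fact_keys_for_query_py; infer_instance

-- ===== CLAIM (what is proved, stated in full; the proofs are below) =====
def Claim_equal_fact_keys_for_query_py : Prop := ∀ (query : String), Dom_fact_keys_for_query_py query → Spec_fact_keys_for_query_py query (fact_keys_for_query_py query)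

-- ===== LEMMAS AND PROOFS =====

-- A's two accumulation loops over INTENT_HINTS, with a generic start
def aFound (q : String) (L : List (String × List String)) (f0 : List String) : List String :=
  L.foldl (fun found kv =>
    if kv.2.any (fun h => PySem.Str.isIn h q) then found ++ [kv.1] else found) f0

def aScored (q : String) (L : List (String × List String)) (sc0 : List (Int × String)) : List (Int × String) :=
  L.foldl (fun sc kv =>
    let hits : Int := kv.2.foldl (fun n h => if PySem.Str.isIn h q then n + 1 else n) 0
    if 0 < hits then sc ++ [(hits, kv.1)] else sc) sc0

def hitsOf (q : String) (kv : String × List String) : Int :=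
  kv.2.foldl (fun n h => if PySem.Str.isIn h q then n + 1 else n) 0

def scoredL (q : String) (L : List (String × List String)) : List (Int × String) :=
  (L.filter (fun kv => decide ((0 : Int) < hitsOf q kv))).map (fun kv => (hitsOf q kv, kv.1))

-- the step of A's insertion-ordered dedup, and of its sorted-descending head
def dstep (out : List String) (k : String) : List String :=
  if !(out.contains k) then out ++ [k] else out

def bestf {α : Type} (m x : Int × α) : Int × α := if m.1 < x.1 then x else m

-- B's matched list factored through the filtered triple table
def selT (q : String) : List (String × List String × List String) :=
  intentData.filter (fun t => t.2.1.any (fun h => PySem.Str.isIn h q))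

def htT (q : String) (t : String × List String × List String) : Int :=
  ((t.2.1.countP (fun h => PySem.Str.isIn h q) : Nat) : Int)

theorem hits_eq (q : String) (hs : List String) :
    (hs.foldl (fun n h => if PySem.Str.isIn h q then n + 1 else n) (0 : Int)) =
      ((hs.countP (fun h => PySem.Str.isIn h q) : Nat) : Int) := by
  rw [PySem.List.foldl_if_add_one]; simp

theorem hits_pos_iff_any (q : String) (hs : List String) :
    ((0 : Int) < hs.foldl (fun n h => if PySem.Str.isIn h q then n + 1 else n) 0) ↔
      hs.any (fun h => PySem.Str.isIn h q) = true := by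
  rw [hits_eq, Int.natCast_pos, List.countP_pos_iff, List.any_eq_true]

theorem aScored_eq (q : String) (L : List (String × List String)) :
    ∀ (sc0 : List (Int × String)), aScored q L sc0 = sc0 ++ scoredL q L := by
  induction L with
  | nil => intro sc0; simp [aScored, scoredL]
  | cons kv L ih =>
    intro sc0
    rw [show aScored q (kv :: L) sc0 =
      aScored q L (if 0 < hitsOf q kv then sc0 ++ [(hitsOf q kv, kv.1)] else sc0) from rfl, ih]
    by_cases h : (0 : Int) < hitsOf q kv
    · simp [scoredL, h]
    · simp [scoredL, h]

theorem aFound_eq (q : String) (L : List (String × List String)) :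
    ∀ (f0 : List String), aFound q L f0 = f0 ++ (scoredL q L).map (fun x => x.2) := by
  induction L with
  | nil => intro f0; simp [aFound, scoredL]
  | cons kv L ih =>
    intro f0
    rw [show aFound q (kv :: L) f0 =
      aFound q L (if kv.2.any (fun h => PySem.Str.isIn h q) then f0 ++ [kv.1] else f0) from rfl, ih]
    by_cases h : (0 : Int) < hitsOf q kv
    · rw [if_pos ((hits_pos_iff_any q kv.2).mp h)]
      simp [scoredL, h]
    · rw [if_neg (fun hc => h ((hits_pos_iff_any q kv.2).mpr hc))]
      simp [scoredL, h]

-- bridge: A's two dicts are the two projections of B's merged table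
theorem hints_proj : intentHints = intentData.map (fun t => (t.1, t.2.1)) := by rfl

theorem keys_fact : ∀ t ∈ intentData, intentFactKeys.getD t.1 [] = t.2.2 := by decide

theorem names_nodup : (intentData.map (fun t => t.1)).Nodup := by decide

theorem scored_sel (q : String) :
    scoredL q intentHints = (selT q).map (fun t => (htT q t, t.1)) := by
  rw [hints_proj]
  unfold scoredL selT
  rw [List.filter_map, List.map_map]
  have h1 : ∀ t : String × List String × List String,
      ((fun kv => decide ((0 : Int) < hitsOf q kv)) ∘ (fun t => (t.1, t.2.1))) t =
        (fun t => t.2.1.any (fun h => PySem.Str.isIn h q)) t := by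
    intro t
    simp only [Function.comp]
    by_cases h : (0 : Int) < hitsOf q (t.1, t.2.1)
    · simp only [h, decide_true]
      exact ((hits_pos_iff_any q t.2.1).mp h).symm
    · simp only [h, decide_false]
      exact (Bool.eq_false_iff.mpr (fun hc => h ((hits_pos_iff_any q t.2.1).mpr hc))).symm
  have h2 : ((fun kv : String × List String => (hitsOf q kv, kv.1)) ∘ (fun t => (t.1, t.2.1))) =
      fun t : String × List String × List String => (htT q t, t.1) := by
    funext t
    simp only [Function.comp, hitsOf, htT]
    rw [hits_eq]
  rw [List.filter_congr (fun t _ => h1 t), h2]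

theorem bestf_fst {α : Type} (s x : Int × α) : (bestf s x).1 = max s.1 x.1 := by
  unfold bestf; split_ifs <;> omega

-- the first element whose score attains the running maximum IS the running first-max
theorem find_fmax {α : Type} (l : List (Int × α)) : ∀ (s : Int × α),
    List.find? (fun x => x.1 == l.foldl (fun m y => max m y.1) s.1) (s :: l) =
      some (l.foldl bestf s) := by
  induction l with
  | nil => intro s; simp [List.find?]
  | cons x l ih =>
    intro s
    simp only [List.foldl_cons]
    rw [show max s.1 x.1 = (bestf s x).1 from (bestf_fst s x).symm]
    have hle := (PySem.List.le_foldl_max_int l (fun y => y.1) (bestf s x).1).1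
    by_cases h : s.1 < x.1
    · have hb : bestf s x = x := by simp [bestf, h]
      rw [hb] at hle ⊢
      have hps : (s.1 == List.foldl (fun m y => max m y.1) x.1 l) = false := by
        simp only [beq_eq_false_iff_ne, ne_eq]
        omega
      have hgoal := ih x
      simp only [List.find?_cons, hps] at *
      exact hgoal
    · have hb : bestf s x = s := by simp [bestf, h]
      rw [hb] at hle ⊢
      have h1 := ih s
      by_cases hp : (s.1 == List.foldl (fun m y => max m y.1) s.1 l) = true
      · simp only [List.find?_cons, hp] at h1 ⊢
        exact h1
      · have hps : (s.1 == List.foldl (fun m y => max m y.1) s.1 l) = false :=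
          Bool.eq_false_iff.mpr (fun hc => hp hc)
        have hpx : (x.1 == List.foldl (fun m y => max m y.1) s.1 l) = false := by
          simp only [beq_eq_false_iff_ne, ne_eq]
          simp only [beq_eq_false_iff_ne, ne_eq] at hps
          omega
        simp only [List.find?_cons, hps, hpx] at h1 ⊢
        exact h1

theorem insert_head {α : Type} (x : Int × α) (ys : List (Int × α)) :
    (PySem.List.insertBy (fun a b => decide (b.1 < a.1)) x ys).head? =
      some (match ys with | [] => x | y :: _ => if y.1 < x.1 then x else y) := by
  cases ys with
  | nil => simp [PySem.List.insertBy]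
  | cons y t =>
    simp only [PySem.List.insertBy]
    split_ifs with h <;> simp_all

theorem sort_head {α : Type} (l : List (Int × α)) :
    ∀ (acc : List (Int × α)) (y : Int × α), acc.head? = some y →
    (l.foldl (fun acc x => PySem.List.insertBy (fun a b => decide (b.1 < a.1)) x acc) acc).head? =
      some (l.foldl bestf y) := by
  induction l with
  | nil => intro acc y h; simpa using h
  | cons x l ih =>
    intro acc y h
    cases acc with
    | nil => simp at h
    | cons a t =>
      simp only [List.head?_cons, Option.some.injEq] at h
      subst h
      simp only [List.foldl_cons]
      apply ih
      rw [insert_head]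
      simp only [bestf]

-- A's seen/out pair loop keeps both components equal, and its step is Set.add
theorem pairdedup (ks : List String) :
    ∀ (s : List String),
    ks.foldl (fun (st : PySem.Set String × List String) k =>
        if PySem.Set.contains st.1 k then st else (PySem.Set.add st.1 k, st.2 ++ [k])) (s, s) =
      (ks.foldl dstep s, ks.foldl dstep s) := by
  induction ks with
  | nil => intro s; rfl
  | cons k ks ih =>
    intro s
    simp only [List.foldl_cons]
    by_cases h : PySem.Set.contains s k
    · rw [if_pos h]
      have hd : dstep s k = s := by
        rw [PySem.Set.contains_eq_listContains] at h
        unfold dstep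
        rw [h]
        simp
      rw [hd]
      exact ih s
    · rw [if_neg h]
      have hc : s.contains k = false := by
        rw [PySem.Set.contains_eq_listContains] at h
        exact Bool.eq_false_iff.mpr h
      have ha : PySem.Set.add s k = s ++ [k] := by
        rw [PySem.Set.add, PySem.Set.contains_eq_listContains, hc]
        simp
      have hd : dstep s k = s ++ [k] := by
        unfold dstep
        rw [hc]
        simp
      rw [ha, hd]
      exact ih (s ++ [k])

theorem dstep_eq_add (s : PySem.Set String) (k : String) : dstep s k = PySem.Set.add s k := by
  unfold dstep
  rw [PySem.Set.add, PySem.Set.contains_eq_listContains]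
  cases h : s.contains k <;> simp

-- A's whole key-emission + dedup pipeline, as dedup of a flatMap
def keysOut (intents : List String) : List String :=
  ((intents.foldl (fun ks i => ks ++ (intentFactKeys.getD i [])) []).foldl
    (fun (st : PySem.Set String × List String) k =>
      if PySem.Set.contains st.1 k then st
      else (PySem.Set.add st.1 k, st.2 ++ [k])) (PySem.Set.empty, [])).2

theorem keysOut_eq (l : List String) :
    keysOut l = PySem.List.dedup (l.flatMap (fun i => intentFactKeys.getD i [])) := by
  unfold keysOut
  rw [show ((PySem.Set.empty : PySem.Set String), ([] : List String)) =
    (([] : List String), ([] : List String)) from rfl]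
  rw [pairdedup, PySem.List.foldl_append_eq_flatMap]
  rw [PySem.List.dedup_eq_ofList, PySem.Set.ofList_eq_foldl]
  have hf : dstep = PySem.Set.add := by funext s k; exact dstep_eq_add s k
  rw [hf]
  rfl

-- removing the (unique) pi-th element by value equals slicing around pi
theorem filter_erase {α : Type} [DecidableEq α] (l : List α) (pi : Nat) (hnd : l.Nodup)
    (hpi : pi < l.length) :
    l.filter (fun x => x != l[pi]) = l.take pi ++ l.drop (pi + 1) := by
  induction l generalizing pi with
  | nil => simp at hpi
  | cons a l ih =>
    cases pi with
    | zero =>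
      simp only [List.getElem_cons_zero, List.take_zero, List.drop_succ_cons, List.drop_zero,
        List.nil_append, List.filter_cons]
      rw [if_neg (by simp)]
      have : ∀ x ∈ l, (x != a) = true := by
        intro x hx
        simp only [bne_iff_ne, ne_eq]
        intro hxa
        exact (List.nodup_cons.mp hnd).1 (hxa ▸ hx)
      exact List.filter_eq_self.mpr this
    | succ pi =>
      simp only [List.getElem_cons_succ, List.take_succ_cons, List.drop_succ_cons,
        List.cons_append, List.filter_cons]
      have hpl : pi < l.length := by simpa using hpi
      have ha : (a != l[pi]) = true := by
        simp only [bne_iff_ne, ne_eq]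
        intro hq
        exact (List.nodup_cons.mp hnd).1 (hq ▸ l.getElem_mem hpl)
      rw [if_pos ha, ih pi (List.nodup_cons.mp hnd).2 hpl]

-- flatMap through the fact-key dict equals flatMap of the stored keys, on rows of the table
theorem flatMap_keys (l : List (String × List String × List String))
    (h : ∀ t ∈ l, t ∈ intentData) :
    (l.map (fun t => t.1)).flatMap (fun i => intentFactKeys.getD i []) =
      l.flatMap (fun t => t.2.2) := by
  induction l with
  | nil => rfl
  | cons t l ih =>
    simp only [List.map_cons, List.flatMap_cons]
    rw [keys_fact t (h t (List.mem_cons_self ..)), ih (fun u hu => h u (List.mem_cons_of_mem _ hu))]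

-- the two post-lowering bodies
def aPost (q : String) : List String :=
  let intents := aFound q intentHints []
  let primary := if (aScored q intentHints []).isEmpty then none
    else ((PySem.List.sorted (aScored q intentHints []) (fun x => x.1) true).head?.map (fun x => x.2))
  keysOut (match primary with
    | some p => if intents.contains p then p :: intents.filter (fun i => i != p) else intents
    | none => intents)

def bPost (q : String) : List String :=
  let matched : List (Int × List String) :=
    (intentData.filter (fun t => t.2.1.any (fun h => PySem.Str.isIn h q))).map
      (fun t => (((t.2.1.countP (fun h => PySem.Str.isIn h q) : Nat) : Int), t.2.2))
  if matched.isEmpty then []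
  else
    let top : Int := (PySem.List.max? (matched.map (fun x => x.1)) (fun n => n)).getD 0
    let pi : Nat := matched.findIdx (fun x => x.1 == top)
    PySem.List.dedup
      ((matched.getD pi (0, []) :: (matched.take pi ++ matched.drop (pi + 1))).flatMap
        (fun x => x.2))

theorem post_eq (q : String) : aPost q = bPost q := by
  unfold aPost bPost
  rw [aScored_eq, aFound_eq, scored_sel]
  have hm : (intentData.filter (fun t => t.2.1.any (fun h => PySem.Str.isIn h q))).map
      (fun t => (((t.2.1.countP (fun h => PySem.Str.isIn h q) : Nat) : Int), t.2.2)) =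
      (selT q).map (fun t => (htT q t, t.2.2)) := rfl
  rw [hm]
  simp only [List.nil_append]
  have hsub : ∀ u ∈ selT q, u ∈ intentData := fun u hu => List.mem_of_mem_filter hu
  have hnd : ((selT q).map (fun u => u.1)).Nodup :=
    names_nodup.sublist ((List.filter_sublist).map _)
  cases hsel : selT q with
  | nil => rfl
  | cons t rest =>
    rw [hsel] at hsub hnd
    simp only [List.map_cons, List.map_map, List.isEmpty_cons, Bool.false_eq_true, if_false,
      Function.comp_def]
    rw [PySem.List.max?_id_cons]
    simp only [Option.getD_some]
    rw [List.foldl_map]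
    generalize hT : List.foldl (fun x y => max x (htT q y)) (htT q t) rest = T
    have hnB : List.findIdx (fun x => x.1 == T)
        ((htT q t, t.2.2) :: List.map (fun u => (htT q u, u.2.2)) rest)
        = List.findIdx (fun u => htT q u == T) (t :: rest) := by
      rw [show ((htT q t, t.2.2) :: List.map (fun u => (htT q u, u.2.2)) rest)
          = List.map (fun u => (htT q u, u.2.2)) (t :: rest) from rfl]
      rw [List.findIdx_map]
      rfl
    rw [hnB]
    have hsort : (PySem.List.sorted ((htT q t, t.1) :: List.map (fun u => (htT q u, u.1)) rest)
        (fun x => x.1) true).head?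
        = some ((List.map (fun u => (htT q u, u.1)) rest).foldl bestf (htT q t, t.1)) := by
      rw [PySem.List.sorted_rev_eq_foldl_insertBy]
      simp only [List.foldl_cons]
      exact sort_head _ _ _ rfl
    rw [hsort]
    simp only [Option.map_some]
    have hfind : List.find? (fun x => x.1 == T)
        ((htT q t, t.1) :: List.map (fun u => (htT q u, u.1)) rest)
        = some ((List.map (fun u => (htT q u, u.1)) rest).foldl bestf (htT q t, t.1)) := by
      have h0 := find_fmax (List.map (fun u => (htT q u, u.1)) rest) (htT q t, t.1)
      rw [List.foldl_map] at h0
      dsimp only at h0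
      rw [hT] at h0
      exact h0
    have hnA : List.findIdx (fun x => x.1 == T)
        ((htT q t, t.1) :: List.map (fun u => (htT q u, u.1)) rest)
        = List.findIdx (fun u => htT q u == T) (t :: rest) := by
      rw [show ((htT q t, t.1) :: List.map (fun u => (htT q u, u.1)) rest)
          = List.map (fun u => (htT q u, u.1)) (t :: rest) from rfl]
      rw [List.findIdx_map]
      rfl
    have hsome : (List.map (fun u => (htT q u, u.1)) (t :: rest))[(List.findIdx
        (fun u => htT q u == T) (t :: rest))]?
        = some ((List.map (fun u => (htT q u, u.1)) rest).foldl bestf (htT q t, t.1)) := by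
      rw [← hnA, show (List.map (fun u => (htT q u, u.1)) (t :: rest))
          = ((htT q t, t.1) :: List.map (fun u => (htT q u, u.1)) rest) from rfl,
        ← List.find?_eq_getElem?_findIdx]
      exact hfind
    have hlt : List.findIdx (fun u => htT q u == T) (t :: rest) < (t :: rest).length := by
      have := (List.getElem?_eq_some_iff.mp hsome).1
      simpa using this
    have hfm : (List.map (fun u => (htT q u, u.1)) rest).foldl bestf (htT q t, t.1)
        = (htT q ((t :: rest)[List.findIdx (fun u => htT q u == T) (t :: rest)]'hlt),
           ((t :: rest)[List.findIdx (fun u => htT q u == T) (t :: rest)]'hlt).1) := by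
      have h1 := hsome
      rw [List.getElem?_map, List.getElem?_eq_getElem hlt] at h1
      simp only [Option.map_some, Option.some.injEq] at h1
      exact h1.symm
    rw [hfm]
    dsimp only
    set nP := List.findIdx (fun u => htT q u == T) (t :: rest) with hnPdef
    have hordsub : ∀ u ∈ ((t :: rest)[nP]'hlt) :: (List.take nP (t :: rest) ++ List.drop (nP + 1) (t :: rest)),
        u ∈ intentData := by
      intro u hu
      rcases List.mem_cons.mp hu with h | h
      · exact hsub _ (h ▸ List.getElem_mem hlt)
      · rcases List.mem_append.mp h with h | h
        · exact hsub _ (List.mem_of_mem_take h)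
        · exact hsub _ (List.mem_of_mem_drop h)
    have hcon : ((List.map (fun u => u.1) (t :: rest)).contains (((t :: rest)[nP]'hlt).1)) = true := by
      have hmemb := List.mem_map_of_mem (f := fun u : String × List String × List String => u.1)
        (List.getElem_mem hlt)
      simpa using hmemb
    rw [show (t.1 :: List.map (fun x => x.1) rest) = List.map (fun u => u.1) (t :: rest) from rfl]
    rw [if_pos hcon]
    have hfe := filter_erase (List.map (fun u => u.1) (t :: rest)) nP hnd (by simpa using hlt)
    rw [List.getElem_map] at hfe
    rw [hfe]
    have hgd : ((htT q t, t.2.2) :: List.map (fun u => (htT q u, u.2.2)) rest).getD nP (0, [])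
        = ((fun u : String × List String × List String => (htT q u, u.2.2)) ((t :: rest)[nP]'hlt)) := by
      rw [List.getD_eq_getElem?_getD,
        show ((htT q t, t.2.2) :: List.map (fun u => (htT q u, u.2.2)) rest)
          = List.map (fun u => (htT q u, u.2.2)) (t :: rest) from rfl,
        List.getElem?_map, List.getElem?_eq_getElem hlt]
      rfl
    rw [hgd]
    rw [show ((htT q t, t.2.2) :: List.map (fun t => (htT q t, t.2.2)) rest)
        = List.map (fun u => (htT q u, u.2.2)) (t :: rest) from rfl]
    rw [keysOut_eq]
    rw [show (((t :: rest)[nP]'hlt).1 ::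
          (List.take nP (List.map (fun u => u.1) (t :: rest)) ++
            List.drop (nP + 1) (List.map (fun u => u.1) (t :: rest))))
        = List.map (fun u => u.1)
            (((t :: rest)[nP]'hlt) :: (List.take nP (t :: rest) ++ List.drop (nP + 1) (t :: rest)))
        from by simp]
    rw [flatMap_keys _ hordsub]
    rw [show ((fun u : String × List String × List String => (htT q u, u.2.2)) ((t :: rest)[nP]'hlt) ::
          (List.take nP (List.map (fun u => (htT q u, u.2.2)) (t :: rest)) ++
            List.drop (nP + 1) (List.map (fun u => (htT q u, u.2.2)) (t :: rest))))
        = List.map (fun u => (htT q u, u.2.2))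
            (((t :: rest)[nP]'hlt) :: (List.take nP (t :: rest) ++ List.drop (nP + 1) (t :: rest)))
        from by simp]
    rw [List.flatMap_map]

theorem fact_keys_main (query : String) :
    fact_keys_for_query_py query = fact_keys_for_query_py_alt query := by
  rw [show fact_keys_for_query_py query = aPost (PySem.Str.lower query) from rfl]
  rw [show fact_keys_for_query_py_alt query = bPost (PySem.Str.lower query) from rfl]
  exact post_eq (PySem.Str.lower query)

-- ===== VERDICT (by name: the statement is the Claim_ definition above) =====
theorem fact_keys_for_query_py_spec : Claim_equal_fact_keys_for_query_py := by
  intro query _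
  unfold Spec_fact_keys_for_query_py
  exact fact_keys_main query
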